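-- pv_equiv track=rewrite | github.com/ANNarchy/ANNarchy | ANNarchy/parser/report/LatexParser.py | _latexify_name
-- ===== SOURCE A (Python) =====
-- greek = ['alpha', 'beta', 'gamma', 'epsilon', 'eta', 'kappa', 'delta', 'lambda', 'mu', 'nu', 'zeta', 'sigma', 'phi', 'psi', 'rho', 'omega', 'xi', 'tau',
--          'Gamma', 'Delta', 'Theta', 'Lambda', 'Xi', 'Phi', 'Psi', 'Omega'
-- ]
--
-- def _latexify_name(name, local):
--     parts = name.split('_')
--     if len(parts) == 1:
--         if len(name) == 1:
--             equiv = name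
--         elif name in greek:
--             equiv = '\\' + name
--         else:
--             equiv = '{\\text{' + name + '}}'
--         if name in local:
--             equiv = '{' + equiv + '}(t)'
--         return equiv
--     elif len(parts) == 2:
--         equiv = ""
--         for p in parts:
--             if len(p) == 1:
--                 equiv += '' + p + '_'
--             elif p in greek:
--                 equiv += '\\' + p + '_'
--             else:
--                 equiv += '{\\text{' + p + '}}' + '_'
--         equiv = equiv[:-1]
--         if name in local:
--             equiv = '{' + equiv + '}(t)'
--         return equiv
--     else:
--         equiv = '{\\text{' + name + '}}'
--         equiv = equiv.replace('_', '-')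
--         if name in local:
--             equiv = equiv + '(t)'
--         return equiv
-- ===== SOURCE B (Python) =====
-- greek = ['alpha', 'beta', 'gamma', 'epsilon', 'eta', 'kappa', 'delta', 'lambda', 'mu', 'nu', 'zeta', 'sigma', 'phi', 'psi', 'rho', 'omega', 'xi', 'tau',
--          'Gamma', 'Delta', 'Theta', 'Lambda', 'Xi', 'Phi', 'Psi', 'Omega'
-- ]
--
-- def _latexify_name(name, local):
--     # Names with >= 2 underscores: whole name, underscores turned into dashes.
--     if name.count('_') >= 2:
--         equiv = '{\\text{' + name.replace('_', '-') + '}}'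
--         return equiv + '(t)' if name in local else equiv
--     # <= 1 underscore: one streaming pass over the characters, formatting each
--     # '_'-delimited segment as it is flushed (no parts list is ever built).
--     equiv = ''
--     part = ''
--     for ch in name + '_':
--         if ch == '_':
--             if len(part) == 1:
--                 equiv += part
--             elif part in greek:
--                 equiv += '\\' + part
--             else:
--                 equiv += '{\\text{' + part + '}}'
--             equiv += '_'
--             part = ''
--         else:
--             part += ch
--     equiv = equiv[:-1]
--     if name in local:
--         equiv = '{' + equiv + '}(t)'
--     return equiv
-- ===== Notes on version B (the rewrite author's own statement) =====
-- stated objective: alternative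
-- what changed: B never builds the split parts list: it counts underscores once to pick the >=2 branch (building that result by replacing inside name before wrapping), and otherwise formats the name in a single character-level streaming pass that flushes each '_'-delimited segment as it is completed, replacing A's split + three length-indexed branches.
import Mathlib
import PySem

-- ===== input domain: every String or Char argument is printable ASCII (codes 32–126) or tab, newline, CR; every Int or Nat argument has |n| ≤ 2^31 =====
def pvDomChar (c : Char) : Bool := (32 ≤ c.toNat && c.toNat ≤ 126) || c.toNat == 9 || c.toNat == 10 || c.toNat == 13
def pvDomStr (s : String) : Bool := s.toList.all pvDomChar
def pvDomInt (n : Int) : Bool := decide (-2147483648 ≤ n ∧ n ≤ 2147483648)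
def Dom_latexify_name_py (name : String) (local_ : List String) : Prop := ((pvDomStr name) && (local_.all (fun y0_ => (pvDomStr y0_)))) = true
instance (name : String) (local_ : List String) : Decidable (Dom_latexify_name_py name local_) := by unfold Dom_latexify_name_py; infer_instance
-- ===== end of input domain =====

-- B replaces A's split-into-parts + three length-indexed branches by an underscore count
-- plus one character-level streaming pass that flushes each segment as it completes
-- (objective: alternative). Return-value equivalence; neither mutates its arguments.


-- ===== PORT A =====
-- module-level constant `greek`
def pvGreek : List String :=
  ["alpha", "beta", "gamma", "epsilon", "eta", "kappa", "delta", "lambda", "mu", "nu",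
   "zeta", "sigma", "phi", "psi", "rho", "omega", "xi", "tau",
   "Gamma", "Delta", "Theta", "Lambda", "Xi", "Phi", "Psi", "Omega"]

-- name.split('_') with the non-empty separator '_' is exact as PySem.Chars.splitOn on code points
def latexify_name_py (name : String) (local_ : List String) : String :=
  let parts : List String := (PySem.Chars.splitOn name.toList ['_']).map String.ofList
  if parts.length == 1 then
    let equiv : String :=
      if PySem.Str.len name == 1 then name
      else if pvGreek.contains name then "\\" ++ name
      else "{\\text{" ++ name ++ "}}"
    if local_.contains name then "{" ++ equiv ++ "}(t)" else equiv
  else if parts.length == 2 then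
    let equiv : String := parts.foldl (fun eq p =>
      if PySem.Str.len p == 1 then eq ++ "" ++ p ++ "_"
      else if pvGreek.contains p then eq ++ "\\" ++ p ++ "_"
      else eq ++ "{\\text{" ++ p ++ "}}" ++ "_") ""
    let equiv := PySem.Str.slice equiv none (some (-1))   -- equiv[:-1]
    if local_.contains name then "{" ++ equiv ++ "}(t)" else equiv
  else
    let equiv : String := "{\\text{" ++ name ++ "}}"
    let equiv := PySem.Str.replace equiv "_" "-"
    if local_.contains name then equiv ++ "(t)" else equiv

-- ===== PORT B =====
-- the body of B's for-loop over the characters of name + '_' (state = (equiv, part), code points)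
def pvStep (st : List Char × List Char) (ch : Char) : List Char × List Char :=
  if ch == '_' then
    let fmtd : List Char :=
      if st.2.length == 1 then st.2
      else if pvGreek.contains (String.ofList st.2) then '\\' :: st.2
      else "{\\text{".toList ++ st.2 ++ "}}".toList
    (st.1 ++ fmtd ++ ['_'], [])
  else (st.1, st.2 ++ [ch])

def latexify_name_py_alt (name : String) (local_ : List String) : String :=
  if 2 ≤ PySem.Str.count name "_" then
    let equiv : String := "{\\text{" ++ PySem.Str.replace name "_" "-" ++ "}}"
    if local_.contains name then equiv ++ "(t)" else equiv
  else
    let st := (name.toList ++ ['_']).foldl pvStep ([], [])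
    let equiv : String := String.ofList (PySem.List.slice st.1 none (some (-1)))  -- equiv[:-1]
    if local_.contains name then "{" ++ equiv ++ "}(t)" else equiv

-- ===== PRECONDITION & SPEC =====
def Spec_latexify_name_py (name : String) (local_ : List String) (out : String) : Prop := out = latexify_name_py_alt name local_
instance (name : String) (local_ : List String) (out : String) : Decidable (Spec_latexify_name_py name local_ out) := by unfold Spec_latexify_name_py; infer_instance

-- ===== CLAIM (what is proved, stated in full; the proofs are below) =====
def Claim_equal_latexify_name_py : Prop := ∀ (name : String) (local_ : List String), Dom_latexify_name_py name local_ → Spec_latexify_name_py name local_ (latexify_name_py name local_)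

-- ===== LEMMAS AND PROOFS =====

-- reference split on '_' (proof-only), and the formatted form of one part
def pvConsHead (x : List Char) : List (List Char) → List (List Char)
  | [] => [x]
  | p :: ps => (x ++ p) :: ps

def pvSp : List Char → List (List Char)
  | [] => [[]]
  | c :: r => if c = '_' then [] :: pvSp r else pvConsHead [c] (pvSp r)

def pvF (p : List Char) : List Char :=
  if p.length == 1 then p
  else if pvGreek.contains (String.ofList p) then '\\' :: p
  else "{\\text{".toList ++ p ++ "}}".toList

theorem pvSp_ne_nil (l : List Char) : pvSp l ≠ [] := by
  cases l with
  | nil => simp [pvSp]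
  | cons c r =>
    simp only [pvSp]
    split
    · simp
    · cases h : pvSp r <;> simp [pvConsHead]

theorem pv_go_eq (fuel : Nat) : ∀ (l cur acc : _), l.length < fuel →
    PySem.Chars.splitOn.go ['_'] fuel l cur acc = acc.reverse ++ pvConsHead cur.reverse (pvSp l) := by
  induction fuel with
  | zero => intro l cur acc h; omega
  | succ n ih =>
    intro l cur acc h
    cases l with
    | nil => simp [PySem.Chars.splitOn.go, pvSp, pvConsHead]
    | cons c rest =>
      rw [PySem.Chars.splitOn.go]
      by_cases hc : c = '_'
      · rw [if_pos (by simp [hc, List.isPrefixOf])]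
        rw [show List.drop (['_'] : List Char).length (c :: rest) = rest from by simp]
        rw [ih rest [] (cur.reverse :: acc) (by simpa using Nat.lt_of_succ_lt_succ h)]
        subst hc
        simp only [pvSp]
        cases hr : pvSp rest with
        | nil => exact absurd hr (pvSp_ne_nil rest)
        | cons p ps => simp [pvConsHead]
      · rw [if_neg (by simp [List.isPrefixOf]; exact fun he => hc he.symm)]
        rw [ih rest (c :: cur) acc (by simpa using Nat.lt_of_succ_lt_succ h)]
        simp only [pvSp, if_neg hc]
        cases hr : pvSp rest with
        | nil => exact absurd hr (pvSp_ne_nil rest)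
        | cons p ps => simp [pvConsHead, List.append_assoc]

theorem pv_splitOn_eq (l : List Char) : PySem.Chars.splitOn l ['_'] = pvSp l := by
  rw [PySem.Chars.splitOn, pv_go_eq (l.length + 1) l [] [] (by omega)]
  cases h : pvSp l with
  | nil => exact absurd h (pvSp_ne_nil l)
  | cons p ps => simp [pvConsHead]

theorem pv_count_go (fuel : Nat) : ∀ (l : List Char) (acc : Nat), l.length ≤ fuel →
    PySem.Chars.count.go ['_'] fuel l acc = acc + l.count '_' := by
  induction fuel with
  | zero =>
    intro l acc h
    have : l = [] := List.length_eq_zero_iff.mp (Nat.le_zero.mp h)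
    subst this; simp [PySem.Chars.count.go]
  | succ n ih =>
    intro l acc h
    cases l with
    | nil => simp [PySem.Chars.count.go]
    | cons c rest =>
      rw [PySem.Chars.count.go]
      by_cases hc : c = '_'
      · rw [if_pos (by simp [hc, List.isPrefixOf])]
        rw [show List.drop (['_'] : List Char).length (c :: rest) = rest from by simp]
        rw [ih rest (acc + 1) (by simpa using Nat.le_of_succ_le_succ h)]
        subst hc; simp; omega
      · rw [if_neg (by simp [List.isPrefixOf]; exact fun he => hc he.symm)]
        rw [ih rest acc (by simpa using Nat.le_of_succ_le_succ h)]
        simp [hc]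

theorem pv_count_eq (l : List Char) : PySem.Chars.count l ['_'] = l.count '_' := by
  rw [PySem.Chars.count, if_neg (by simp)]
  simpa using pv_count_go l.length l 0 le_rfl

theorem pv_sp_length (l : List Char) : (pvSp l).length = l.count '_' + 1 := by
  induction l with
  | nil => simp [pvSp]
  | cons c r ih =>
    simp only [pvSp]
    by_cases hc : c = '_'
    · subst hc; simp [ih]
    · rw [if_neg hc]
      cases hr : pvSp r with
      | nil => exact absurd hr (pvSp_ne_nil r)
      | cons p ps =>
        rw [hr] at ih
        simp [pvConsHead, hc] at *
        omega

theorem pv_replace_go (fuel : Nat) : ∀ (l acc : List Char), l.length ≤ fuel →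
    PySem.Chars.replace.go ['_'] ['-'] fuel l acc
      = acc.reverse ++ l.map (fun c => if c = '_' then '-' else c) := by
  induction fuel with
  | zero =>
    intro l acc h
    have : l = [] := List.length_eq_zero_iff.mp (Nat.le_zero.mp h)
    subst this; simp [PySem.Chars.replace.go]
  | succ n ih =>
    intro l acc h
    cases l with
    | nil => simp [PySem.Chars.replace.go]
    | cons c rest =>
      rw [PySem.Chars.replace.go]
      by_cases hc : c = '_'
      · rw [if_pos (by simp [hc, List.isPrefixOf])]
        rw [show List.drop (['_'] : List Char).length (c :: rest) = rest from by simp]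
        rw [ih rest _ (by simpa using Nat.le_of_succ_le_succ h)]
        subst hc; simp
      · rw [if_neg (by simp [List.isPrefixOf]; exact fun he => hc he.symm)]
        rw [ih rest _ (by simpa using Nat.le_of_succ_le_succ h)]
        simp [hc]

theorem pv_replace_eq (l : List Char) :
    PySem.Chars.replace l ['_'] ['-'] = l.map (fun c => if c = '_' then '-' else c) := by
  rw [PySem.Chars.replace, if_neg (by simp)]
  simpa using pv_replace_go l.length l [] le_rfl

theorem pvStep_underscore (st : List Char × List Char) : pvStep st '_' = (st.1 ++ pvF st.2 ++ ['_'], []) := by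
  simp [pvStep, pvF]

theorem pvStep_other (st : List Char × List Char) (c : Char) (hc : ¬ c = '_') :
    pvStep st c = (st.1, st.2 ++ [c]) := by
  simp [pvStep, hc]

theorem pv_fold (l : List Char) : ∀ (acc part : List Char),
    ((l ++ ['_']).foldl pvStep (acc, part)).1
      = acc ++ ((pvConsHead part (pvSp l)).map (fun p => pvF p ++ ['_'])).flatten := by
  induction l with
  | nil =>
    intro acc part
    simp [List.foldl, pvStep_underscore, pvSp, pvConsHead]
  | cons c r ih =>
    intro acc part
    by_cases hc : c = '_'
    · subst hc
      simp only [List.cons_append, List.foldl_cons, pvStep_underscore, ih, pvSp]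
      cases hr : pvSp r with
      | nil => exact absurd hr (pvSp_ne_nil r)
      | cons p ps => simp [pvConsHead, List.append_assoc]
    · simp only [List.cons_append, List.foldl_cons, pvStep_other _ _ hc, ih, pvSp, if_neg hc]
      cases hr : pvSp r with
      | nil => exact absurd hr (pvSp_ne_nil r)
      | cons p ps => simp [pvConsHead, List.append_assoc]

theorem pv_fold' (l acc part : List Char) :
    (pvStep (List.foldl pvStep (acc, part) l) '_').1
      = acc ++ ((pvConsHead part (pvSp l)).map (fun p => pvF p ++ ['_'])).flatten := by
  have h := pv_fold l acc part
  rwa [List.foldl_append, List.foldl_cons, List.foldl_nil] at h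

theorem pv_sp_single (l a : List Char) (h : pvSp l = [a]) : a = l := by
  induction l generalizing a with
  | nil => simp [pvSp] at h; simp [h]
  | cons c r ih =>
    simp only [pvSp] at h
    by_cases hc : c = '_'
    · rw [if_pos hc] at h
      injection h with h1 h2
      exact absurd h2 (pvSp_ne_nil r)
    · rw [if_neg hc] at h
      cases hr : pvSp r with
      | nil => exact absurd hr (pvSp_ne_nil r)
      | cons p ps =>
        rw [hr] at h
        simp only [pvConsHead, List.singleton_append] at h
        injection h with h1 h2
        subst h2
        have hp : p = r := ih p (by rw [hr])
        rw [← h1, hp]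

-- ===== VERDICT (by name: the statement is the Claim_ definition above) =====
theorem latexify_name_py_spec : Claim_equal_latexify_name_py := by
  intro name local_ _
  unfold Spec_latexify_name_py latexify_name_py latexify_name_py_alt
  have hcnt : PySem.Str.count name "_" = name.toList.count '_' := by
    rw [PySem.Str.count]; simpa using pv_count_eq name.toList
  have hlen := pv_sp_length name.toList
  rw [pv_splitOn_eq]
  cases h : pvSp name.toList with
  | nil => exact absurd h (pvSp_ne_nil _)
  | cons p tl =>
    rw [h] at hlen
    cases tl with
    | nil =>
      -- one part: no underscore
      have hc0 : name.toList.count '_' = 0 := by simp at hlen; omega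
      have hp : p = name.toList := pv_sp_single _ _ h
      subst hp
      rw [hcnt, hc0]
      simp only [List.map_cons, List.map_nil, String.ofList_toList, List.length_cons,
        List.length_nil]
      norm_num
      rw [pv_fold' name.toList [] [], h]
      simp only [pvConsHead, List.nil_append,
        PySem.List.slice_to_neg_one]
      unfold pvF
      rw [← String.toList_inj]
      have hbs : "\\".toList = ['\\'] := by decide
      simp only [apply_ite String.toList, String.toList_append, String.toList_ofList,
        hbs, List.singleton_append]
      norm_num
    | cons q tl2 =>
      cases tl2 with
      | nil =>
        -- two parts: exactly one underscore
        have hc1 : name.toList.count '_' = 1 := by simp at hlen; omega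
        rw [hcnt, hc1]
        simp only [List.map_cons, List.map_nil, List.length_cons, List.length_nil]
        norm_num
        rw [pv_fold' name.toList [] [], h]
        simp only [pvConsHead, List.nil_append,
          PySem.List.slice_to_neg_one]
        unfold pvF
        rw [← String.toList_inj]
        simp only [apply_ite String.toList, String.toList_append, String.toList_ofList,
          PySem.Str.slice_to_neg_one]
        norm_num
        split_ifs <;>
          simp [List.dropLast_append_of_ne_nil, List.dropLast_cons_of_ne_nil,
            List.append_assoc]
      | cons s tl3 =>
        -- three or more parts: at least two underscores
        have hc2 : 2 ≤ name.toList.count '_' := by simp at hlen; omega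
        rw [hcnt, if_pos hc2]
        simp only [List.map_cons, List.length_cons]
        have h1 : (((List.map String.ofList tl3).length + 1 + 1 + 1 : Nat) == 1) = false := by simp
        have h2 : (((List.map String.ofList tl3).length + 1 + 1 + 1 : Nat) == 2) = false := by simp
        simp only [h1, h2, Bool.false_eq_true, if_false]
        rw [← String.toList_inj]
        have hu : "_".toList = ['_'] := by decide
        have hm : "-".toList = ['-'] := by decide
        have hlit1 : ("{\\text{".toList.map (fun c => if c = '_' then '-' else c)) = "{\\text{".toList := by decide
        have hlit2 : ("}}".toList.map (fun c => if c = '_' then '-' else c)) = "}}".toList := by decide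
        simp only [apply_ite String.toList, String.toList_append, PySem.Str.toList_replace,
          hu, hm, pv_replace_eq, List.map_append, hlit1, hlit2, List.append_assoc]
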